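-- pv_equiv track=rewrite | github.com/emmanuelle1234/di_exercices | week_8/day_2/week_6 day_2 exercise_mandatory.py | is_the_oldest
-- ===== SOURCE A (Python) =====
-- def is_the_oldest(cats):
--     c_list = [age for key, age in cats.items()]
--     for i in range(len(c_list) - 1):
--         minimum = i
--         for j in range(i + 1, len(c_list)):
--             if c_list[j] < c_list[minimum]:
--                 minimum = j
--                 if (
--                         minimum != i):
--                     c_list[i], c_list[minimum] = c_list[minimum], c_list[i]
--     oldest = c_list[len(c_list) - 1]
--     return oldest
-- ===== SOURCE B (Python) =====
-- def is_the_oldest(cats):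
--     values = list(cats.values())
--     oldest = values[0]
--     for age in values[1:]:
--         if age > oldest:
--             oldest = age
--     return oldest
-- ===== Notes on version B (the rewrite author's own statement) =====
-- stated objective: faster
-- what changed: Replaces A's O(n^2) scrambled selection-sort pass (nested index loops with mid-loop swaps, then taking the last element) by a single linear scan that keeps a running maximum of the ages.
import Mathlib
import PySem

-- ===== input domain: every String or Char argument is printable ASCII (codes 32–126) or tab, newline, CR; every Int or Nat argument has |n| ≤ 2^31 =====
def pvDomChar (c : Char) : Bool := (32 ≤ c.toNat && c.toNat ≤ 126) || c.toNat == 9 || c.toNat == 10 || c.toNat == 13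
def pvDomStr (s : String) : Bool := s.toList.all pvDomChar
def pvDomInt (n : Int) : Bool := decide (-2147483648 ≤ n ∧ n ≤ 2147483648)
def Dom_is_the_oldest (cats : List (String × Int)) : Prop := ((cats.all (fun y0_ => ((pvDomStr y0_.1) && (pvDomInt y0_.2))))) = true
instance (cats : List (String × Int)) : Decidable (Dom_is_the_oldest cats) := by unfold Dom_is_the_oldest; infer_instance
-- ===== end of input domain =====

-- B replaces A's O(n^2) scrambled selection-sort pass (then "take the last element") by one
-- linear scan keeping a running maximum; equal return value on every non-empty dict.

-- ===== PORT A =====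
-- body of A's inner loop: 'if c[j] < c[minimum]: minimum = j; if minimum != i: swap c[i], c[minimum]'
-- (all indices produced by range(len) are in range, so pyGetD/pySetD are exact here)
def pvInnerStep (i : Int) (st : List Int × Int) (j : Int) : List Int × Int :=
  let c := st.1
  let minimum := st.2
  if PySem.List.pyGetD c j 0 < PySem.List.pyGetD c minimum 0 then
    let minimum := j
    if minimum ≠ i then
      let rhs := (PySem.List.pyGetD c minimum 0, PySem.List.pyGetD c i 0)
      let c := PySem.List.pySetD c i rhs.1
      let c := PySem.List.pySetD c minimum rhs.2
      (c, minimum)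
    else (c, minimum)
  else (c, minimum)

def is_the_oldest (cats : List (String × Int)) : Int :=
  let c_list := cats.map (fun kv => kv.2)
  let c := (PySem.List.pyRange 0 ((c_list.length : Int) - 1) 1).foldl
      (fun c i =>
        ((PySem.List.pyRange (i + 1) ((c.length : Int)) 1).foldl (pvInnerStep i) (c, i)).1)
      c_list
  PySem.List.pyGetD c ((c.length : Int) - 1) 0

-- ===== PORT B =====
def is_the_oldest_alt (cats : List (String × Int)) : Int :=
  let values := cats.map (fun kv => kv.2)
  let oldest := PySem.List.pyGetD values 0 0
  (PySem.List.slice values (some 1) none).foldl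
    (fun oldest age => if oldest < age then age else oldest) oldest

-- ===== PRECONDITION & SPEC =====
-- On the empty dict both Pythons raise IndexError (A on c_list[-1], B on values[0]); Pre_ excludes it.
def Pre_is_the_oldest (cats : List (String × Int)) : Prop := cats ≠ []
instance (cats : List (String × Int)) : Decidable (Pre_is_the_oldest cats) := by
  unfold Pre_is_the_oldest; infer_instance

def pvWitness_is_the_oldest : (List (String × Int)) := [("kitty", 5), ("tom", 3)]

def Spec_is_the_oldest (cats : List (String × Int)) (out : Int) : Prop := out = is_the_oldest_alt cats
instance (cats : List (String × Int)) (out : Int) : Decidable (Spec_is_the_oldest cats out) := by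
  unfold Spec_is_the_oldest; infer_instance

-- ===== CLAIM (what is proved, stated in full; the proofs are below) =====
def Claim_equal_is_the_oldest : Prop := ∀ (cats : List (String × Int)), Dom_is_the_oldest cats → Pre_is_the_oldest cats → Spec_is_the_oldest cats (is_the_oldest cats)

-- ===== LEMMAS AND PROOFS =====

/- Invariants of A's inner loop, by induction on the remaining index list `js`
   (state `(c, m)`): the length is preserved, every element stays ≤ M, the marker m
   stays in [i, len) and never returns to i once it left, a final m = i means no swap
   ever fired, a final m > i means c[i] ended strictly below M, and a position ≥ i
   holding M keeps holding M somewhere ≥ i. -/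
theorem pv_inner_inv (i M : Int) (hi : 0 ≤ i) :
    ∀ (js : List Int) (cs : List Int) (m : Int),
      (∀ j ∈ js, i < j ∧ j < (cs.length : Int)) →
      i < (cs.length : Int) → i ≤ m → m < (cs.length : Int) →
      (∀ x ∈ cs, x ≤ M) →
      (i < m → PySem.List.pyGetD cs i 0 < M) →
      (js.foldl (pvInnerStep i) (cs, m)).1.length = cs.length ∧
      (∀ x ∈ (js.foldl (pvInnerStep i) (cs, m)).1, x ≤ M) ∧
      i ≤ (js.foldl (pvInnerStep i) (cs, m)).2 ∧
      (js.foldl (pvInnerStep i) (cs, m)).2 < (cs.length : Int) ∧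
      (i < m → i < (js.foldl (pvInnerStep i) (cs, m)).2) ∧
      ((js.foldl (pvInnerStep i) (cs, m)).2 = i →
        (js.foldl (pvInnerStep i) (cs, m)).1 = cs ∧
        ∀ j ∈ js, ¬ (PySem.List.pyGetD cs j 0 < PySem.List.pyGetD cs i 0)) ∧
      (i < (js.foldl (pvInnerStep i) (cs, m)).2 →
        PySem.List.pyGetD (js.foldl (pvInnerStep i) (cs, m)).1 i 0 < M) ∧
      (∀ k : Nat, i.toNat ≤ k → k < cs.length → cs[k]? = some M →
        ∃ k' : Nat, i.toNat ≤ k' ∧ k' < cs.length ∧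
          (js.foldl (pvInnerStep i) (cs, m)).1[k']? = some M) := by
  intro js
  induction js with
  | nil =>
    intro cs m hjs hilen him hmlen hle hci
    exact ⟨rfl, hle, him, hmlen, fun h => h,
      fun _ => ⟨rfl, fun x hx => absurd hx List.not_mem_nil⟩, hci,
      fun k h1 h2 h3 => ⟨k, h1, h2, h3⟩⟩
  | cons j rest ih =>
    intro cs m hjs hilen him hmlen hle hci
    obtain ⟨hij, hjlen⟩ := hjs j (List.mem_cons_self ..)
    have hjs' : ∀ x ∈ rest, i < x ∧ x < (cs.length : Int) :=
      fun x hx => hjs x (List.mem_cons_of_mem _ hx)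
    simp only [List.foldl_cons]
    have hiN : i.toNat < cs.length := by omega
    have hjN : j.toNat < cs.length := by omega
    by_cases hcond : PySem.List.pyGetD cs j 0 < PySem.List.pyGetD cs m 0
    · -- swap branch (j ≠ i is automatic since i < j)
      have hji : j ≠ i := by omega
      have h0j : (0:Int) ≤ j := by omega
      have hijN : ¬ (j.toNat = i.toNat) := by omega
      have hstep : pvInnerStep i (cs, m) j =
          ((cs.set i.toNat (PySem.List.pyGetD cs j 0)).set j.toNat
            (PySem.List.pyGetD cs i 0), j) := by
        simp only [pvInnerStep]
        rw [if_pos hcond, if_pos hji, PySem.List.pySetD_of_nonneg _ _ hi,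
          PySem.List.pySetD_of_nonneg _ _ h0j]
      rw [hstep]
      have hlen1 : ((cs.set i.toNat (PySem.List.pyGetD cs j 0)).set j.toNat
          (PySem.List.pyGetD cs i 0)).length = cs.length := by simp
      have hiel : PySem.List.pyGetD cs i 0 = cs[i.toNat] :=
        PySem.List.pyGetD_eq_getElem _ _ hi hilen
      have hjel : PySem.List.pyGetD cs j 0 = cs[j.toNat] :=
        PySem.List.pyGetD_eq_getElem _ _ h0j hjlen
      have hmem1 : ∀ x ∈ (cs.set i.toNat (PySem.List.pyGetD cs j 0)).set j.toNat
          (PySem.List.pyGetD cs i 0), x ≤ M := by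
        intro x hx
        rcases List.mem_or_eq_of_mem_set hx with hx1 | rfl
        · rcases List.mem_or_eq_of_mem_set hx1 with hx2 | rfl
          · exact hle x hx2
          · rw [hjel]; exact hle _ (List.getElem_mem hjN)
        · rw [hiel]; exact hle _ (List.getElem_mem hiN)
      have hmIn : PySem.Raise.InRange cs.length m := by
        simp [PySem.Raise.InRange]; omega
      have hvjM : PySem.List.pyGetD cs j 0 < M :=
        lt_of_lt_of_le hcond (hle _ (PySem.List.pyGetD_mem cs 0 hmIn))
      have hcs1i : PySem.List.pyGetD ((cs.set i.toNat (PySem.List.pyGetD cs j 0)).set j.toNat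
          (PySem.List.pyGetD cs i 0)) i 0 = PySem.List.pyGetD cs j 0 := by
        rw [PySem.List.pyGetD_eq_getElem _ _ hi (by rw [hlen1]; exact hilen)]
        simp [hijN]
      obtain ⟨K1, K2, K3, K4, K5, K6, K7, K8⟩ :=
        ih ((cs.set i.toNat (PySem.List.pyGetD cs j 0)).set j.toNat
            (PySem.List.pyGetD cs i 0)) j
          (by rw [hlen1]; exact hjs') (by rw [hlen1]; exact hilen) (le_of_lt hij)
          (by rw [hlen1]; exact hjlen) hmem1 (fun _ => by rw [hcs1i]; exact hvjM)
      have hK5 : i < (rest.foldl (pvInnerStep i)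
          ((cs.set i.toNat (PySem.List.pyGetD cs j 0)).set j.toNat
            (PySem.List.pyGetD cs i 0), j)).2 := K5 hij
      refine ⟨by rw [K1, hlen1], K2, K3, by rw [hlen1] at K4; exact K4, fun _ => hK5,
        fun h => absurd (lt_of_lt_of_eq hK5 h) (lt_irrefl i), fun _ => K7 hK5, ?_⟩
      intro k hk1 hk2 hk3
      by_cases hki : k = i.toNat
      · -- the max sat at i; the swap moved it to j
        subst hki
        have hj1 : ((cs.set i.toNat (PySem.List.pyGetD cs j 0)).set j.toNat
            (PySem.List.pyGetD cs i 0))[j.toNat]? = some M := by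
          rw [List.getElem?_set_self (by simpa using hjN), hiel,
            ← List.getElem?_eq_getElem hiN]
          exact hk3
        obtain ⟨k', hk1', hk2', hk3'⟩ := K8 j.toNat (by omega) (by omega) hj1
        exact ⟨k', hk1', by omega, hk3'⟩
      · by_cases hkj : k = j.toNat
        · -- the max sat at j; the swap moved it to i
          subst hkj
          have hi1 : ((cs.set i.toNat (PySem.List.pyGetD cs j 0)).set j.toNat
              (PySem.List.pyGetD cs i 0))[i.toNat]? = some M := by
            rw [List.getElem?_set_ne hijN, List.getElem?_set_self hiN, hjel,
              ← List.getElem?_eq_getElem hjN]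
            exact hk3
          obtain ⟨k', hk1', hk2', hk3'⟩ := K8 i.toNat (by omega) (by omega) hi1
          exact ⟨k', hk1', by omega, hk3'⟩
        · have hk4 : ((cs.set i.toNat (PySem.List.pyGetD cs j 0)).set j.toNat
              (PySem.List.pyGetD cs i 0))[k]? = some M := by
            rw [List.getElem?_set_ne (by omega), List.getElem?_set_ne (by omega)]
            exact hk3
          obtain ⟨k', hk1', hk2', hk3'⟩ := K8 k hk1 (by omega) hk4
          exact ⟨k', hk1', by omega, hk3'⟩
    · -- no swap: the state is unchanged
      have hstep : pvInnerStep i (cs, m) j = (cs, m) := by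
        simp [pvInnerStep, hcond]
      rw [hstep]
      obtain ⟨K1, K2, K3, K4, K5, K6, K7, K8⟩ := ih cs m hjs' hilen him hmlen hle hci
      refine ⟨K1, K2, K3, K4, K5, ?_, K7, K8⟩
      intro h
      obtain ⟨hr1, hrest⟩ := K6 h
      have hmi : m = i := by
        rcases lt_or_eq_of_le him with hlt | heq
        · exact absurd (lt_of_lt_of_eq (K5 hlt) h) (lt_irrefl i)
        · omega
      refine ⟨hr1, ?_⟩
      intro x hx
      rcases List.mem_cons.mp hx with rfl | hx'
      · rw [← hmi]; exact hcond
      · exact hrest x hx'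

/- One full inner pass started at i moves an occurrence of the maximum M to a position ≥ i+1. -/
theorem pv_outer_step (M : Int) (cs : List Int) (i : Int)
    (hi : 0 ≤ i) (hlen : i + 1 < (cs.length : Int))
    (hle : ∀ x ∈ cs, x ≤ M)
    (hex : ∃ k : Nat, i.toNat ≤ k ∧ k < cs.length ∧ cs[k]? = some M) :
    (((PySem.List.pyRange (i + 1) ((cs.length : Int)) 1).foldl (pvInnerStep i) (cs, i)).1.length = cs.length) ∧
    (∀ x ∈ ((PySem.List.pyRange (i + 1) ((cs.length : Int)) 1).foldl (pvInnerStep i) (cs, i)).1, x ≤ M) ∧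
    ∃ k : Nat, i.toNat + 1 ≤ k ∧ k < cs.length ∧
      ((PySem.List.pyRange (i + 1) ((cs.length : Int)) 1).foldl (pvInnerStep i) (cs, i)).1[k]? = some M := by
  have hjs : ∀ j ∈ PySem.List.pyRange (i + 1) ((cs.length : Int)) 1,
      i < j ∧ j < (cs.length : Int) := by
    intro j hj
    rw [PySem.List.mem_pyRange_one] at hj
    omega
  obtain ⟨K1, K2, K3, K4, K5, K6, K7, K8⟩ :=
    pv_inner_inv i M hi (PySem.List.pyRange (i + 1) ((cs.length : Int)) 1) cs i hjs
      (by omega) le_rfl (by omega) hle (fun h => absurd h (lt_irrefl i))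
  refine ⟨K1, K2, ?_⟩
  obtain ⟨k, hk1, hk2, hk3⟩ := hex
  by_cases hm : ((PySem.List.pyRange (i + 1) ((cs.length : Int)) 1).foldl
      (pvInnerStep i) (cs, i)).2 = i
  · obtain ⟨hr1, hns⟩ := K6 hm
    by_cases hki : k = i.toNat
    · subst hki
      have hmem : (i + 1) ∈ PySem.List.pyRange (i + 1) ((cs.length : Int)) 1 := by
        rw [PySem.List.mem_pyRange_one]; omega
      have h1 := hns _ hmem
      have e1 : PySem.List.pyGetD cs (i + 1) 0 = cs[(i + 1).toNat] :=
        PySem.List.pyGetD_eq_getElem _ _ (by omega) hlen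
      have e0 : PySem.List.pyGetD cs i 0 = cs[i.toNat] :=
        PySem.List.pyGetD_eq_getElem _ _ hi (by omega)
      have hiM : cs[i.toNat] = M := by
        have h5 := List.getElem?_eq_getElem hk2
        rw [hk3] at h5
        exact (Option.some.inj h5).symm
      have hle1 : cs[(i + 1).toNat] ≤ M := hle _ (List.getElem_mem (by omega))
      have heq1 : cs[(i + 1).toNat] = M := by
        rw [e1, e0, hiM] at h1
        omega
      refine ⟨(i + 1).toNat, by omega, by omega, ?_⟩
      rw [hr1, List.getElem?_eq_getElem (by omega : (i + 1).toNat < cs.length)]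
      exact congrArg some heq1
    · exact ⟨k, by omega, hk2, by rw [hr1]; exact hk3⟩
  · have hilt : i < ((PySem.List.pyRange (i + 1) ((cs.length : Int)) 1).foldl
        (pvInnerStep i) (cs, i)).2 := lt_of_le_of_ne K3 (Ne.symm hm)
    have h7 := K7 hilt
    obtain ⟨k', hk1', hk2', hk3'⟩ := K8 k hk1 hk2 hk3
    have hki' : ¬ (k' = i.toNat) := by
      intro h
      subst h
      have e : PySem.List.pyGetD ((PySem.List.pyRange (i + 1) ((cs.length : Int)) 1).foldl
          (pvInnerStep i) (cs, i)).1 i 0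
          = ((PySem.List.pyRange (i + 1) ((cs.length : Int)) 1).foldl
            (pvInnerStep i) (cs, i)).1[i.toNat]'(by rw [K1]; omega) :=
        PySem.List.pyGetD_eq_getElem _ _ hi (by rw [K1]; omega)
      have h5 := List.getElem?_eq_getElem
        (show i.toNat < ((PySem.List.pyRange (i + 1) ((cs.length : Int)) 1).foldl
          (pvInnerStep i) (cs, i)).1.length by rw [K1]; omega)
      rw [hk3'] at h5
      have h6 := (Option.some.inj h5).symm
      rw [e, h6] at h7
      exact absurd h7 (lt_irrefl M)
    exact ⟨k', by omega, hk2', hk3'⟩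

/- A's outer loop, first t iterations: M is still present at some position ≥ t. -/
theorem pv_outer_inv (M : Int) (c0 : List Int)
    (hle : ∀ x ∈ c0, x ≤ M)
    (hex : ∃ k : Nat, k < c0.length ∧ c0[k]? = some M) :
    ∀ t : Nat, t < c0.length →
      ((PySem.List.pyRange 0 (t : Int) 1).foldl
        (fun c i => ((PySem.List.pyRange (i + 1) ((c.length : Int)) 1).foldl (pvInnerStep i) (c, i)).1)
        c0).length = c0.length ∧
      (∀ x ∈ (PySem.List.pyRange 0 (t : Int) 1).foldl
        (fun c i => ((PySem.List.pyRange (i + 1) ((c.length : Int)) 1).foldl (pvInnerStep i) (c, i)).1)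
        c0, x ≤ M) ∧
      ∃ k : Nat, t ≤ k ∧ k < c0.length ∧
        ((PySem.List.pyRange 0 (t : Int) 1).foldl
          (fun c i => ((PySem.List.pyRange (i + 1) ((c.length : Int)) 1).foldl (pvInnerStep i) (c, i)).1)
          c0)[k]? = some M := by
  intro t
  induction t with
  | zero =>
    intro _
    rw [show ((0 : Nat) : Int) = 0 from rfl, PySem.List.pyRange_one_eq_nil le_rfl,
      List.foldl_nil]
    obtain ⟨k, hk1, hk2⟩ := hex
    exact ⟨rfl, hle, k, Nat.zero_le _, hk1, hk2⟩
  | succ t ih =>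
    intro hlt
    obtain ⟨K1, K2, k, hk1, hk2, hk3⟩ := ih (by omega)
    have hcast : ((t + 1 : Nat) : Int) = (t : Int) + 1 := by push_cast; ring
    rw [hcast, PySem.List.pyRange_one_succ_right (by positivity), List.foldl_append,
      List.foldl_cons, List.foldl_nil]
    obtain ⟨H1, H2, k', ha, hb, hc⟩ :=
      pv_outer_step M ((PySem.List.pyRange 0 (t : Int) 1).foldl
        (fun c i => ((PySem.List.pyRange (i + 1) ((c.length : Int)) 1).foldl
          (pvInnerStep i) (c, i)).1) c0) (t : Int)
        (by positivity) (by rw [K1]; omega) K2 ⟨k, by omega, by rw [K1]; exact hk2, hk3⟩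
    exact ⟨by rw [H1, K1], H2, k', by omega, by omega, hc⟩

-- ===== VERDICT (by name: the statement is the Claim_ definition above) =====
theorem is_the_oldest_spec : Claim_equal_is_the_oldest := by
  intro cats _ hpre
  unfold Pre_is_the_oldest at hpre
  simp only [Spec_is_the_oldest, is_the_oldest, is_the_oldest_alt]
  generalize hgen : cats.map (fun kv => kv.2) = c0
  have hne : c0 ≠ [] := by
    rw [← hgen]
    simpa using hpre
  obtain ⟨v, vs, hcv⟩ := List.exists_cons_of_ne_nil hne
  have hlen0 : 0 < c0.length := by rw [hcv]; simp
  -- B computes the running maximum M of c0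
  have hB : (PySem.List.slice c0 (some 1) none).foldl
      (fun oldest age => if oldest < age then age else oldest)
      (PySem.List.pyGetD c0 0 0) = vs.foldl max v := by
    rw [hcv, PySem.List.slice_from_one]
    simp only [List.tail_cons, PySem.List.pyGetD_zero_cons]
    have hfun : (fun (o a : Int) => if o < a then a else o)
        = fun (o a : Int) => max o a := by
      funext o a
      rcases lt_trichotomy o a with h | h | h
      · rw [if_pos h, max_eq_right (le_of_lt h)]
      · rw [h, if_neg (lt_irrefl a), max_self]
      · rw [if_neg (not_lt_of_gt h), max_eq_left (le_of_lt h)]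
    rw [hfun]
  rw [hB]
  have hle0 : ∀ x ∈ c0, x ≤ vs.foldl max v := by
    intro x hx
    rw [hcv] at hx
    rcases List.mem_cons.mp hx with rfl | hx'
    · exact (PySem.List.le_foldl_max vs x).1
    · exact (PySem.List.le_foldl_max vs v).2 x hx'
  have hex0 : ∃ k, k < c0.length ∧ c0[k]? = some (vs.foldl max v) := by
    rcases PySem.List.foldl_max_mem vs v with h | h
    · exact ⟨0, hlen0, by rw [hcv, h]; simp⟩
    · obtain ⟨k, hk, he⟩ := List.getElem_of_mem h
      refine ⟨k + 1, by rw [hcv]; simpa using hk, ?_⟩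
      rw [hcv, List.getElem?_cons_succ, List.getElem?_eq_getElem hk]
      exact congrArg some he
  obtain ⟨K1, K2, k, hk1, hk2, hk3⟩ :=
    pv_outer_inv (vs.foldl max v) c0 hle0 hex0 (c0.length - 1) (by omega)
  have hc1 : ((c0.length - 1 : Nat) : Int) = (c0.length : Int) - 1 := by omega
  rw [← hc1]
  have hrk : ((PySem.List.pyRange 0 ((c0.length - 1 : Nat) : Int) 1).foldl
      (fun c i => ((PySem.List.pyRange (i + 1) ((c.length : Int)) 1).foldl
        (pvInnerStep i) (c, i)).1) c0)[k]'(by rw [K1]; omega) = vs.foldl max v := by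
    have h5 := List.getElem?_eq_getElem (show k < ((PySem.List.pyRange 0
        ((c0.length - 1 : Nat) : Int) 1).foldl
        (fun c i => ((PySem.List.pyRange (i + 1) ((c.length : Int)) 1).foldl
          (pvInnerStep i) (c, i)).1) c0).length by rw [K1]; omega)
    rw [hk3] at h5
    exact (Option.some.inj h5).symm
  rw [PySem.List.pyGetD_eq_getElem _ _ (by rw [K1]; omega) (by rw [K1]; omega)]
  have hidx : ((((PySem.List.pyRange 0 ((c0.length - 1 : Nat) : Int) 1).foldl
      (fun c i => ((PySem.List.pyRange (i + 1) ((c.length : Int)) 1).foldl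
        (pvInnerStep i) (c, i)).1) c0).length : Int) - 1).toNat = k := by
    rw [K1]; omega
  simp only [hidx]
  exact hrk
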